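-- pv_equiv track=rewrite | github.com/ifastcc/DeepChow | paipan/dayun.py | calculate_dayun
-- ===== SOURCE A (Python) =====
-- HEAVENLY_STEMS = ["甲", "乙", "丙", "丁", "戊", "己", "庚", "辛", "壬", "癸"]
--
-- EARTHLY_BRANCHES = ["子", "丑", "寅", "卯", "辰", "巳", "午", "未", "申", "酉", "戌", "亥"]
--
-- def calculate_dayun(month_gan, month_zhi, is_shunxing):
--     dayun = []
--     current_gan = month_gan
--     current_zhi = month_zhi
--     for _ in range(8):
--         dayun.append(HEAVENLY_STEMS[current_gan] + EARTHLY_BRANCHES[current_zhi])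
--         if is_shunxing:
--             current_gan = (current_gan + 1) % 10
--             current_zhi = (current_zhi + 1) % 12
--         else:
--             current_gan = (current_gan - 1) % 10
--             current_zhi = (current_zhi - 1) % 12
--     return dayun
-- ===== SOURCE B (Python) =====
-- HEAVENLY_STEMS = ["甲", "乙", "丙", "丁", "戊", "己", "庚", "辛", "壬", "癸"]
--
-- EARTHLY_BRANCHES = ["子", "丑", "寅", "卯", "辰", "巳", "午", "未", "申", "酉", "戌", "亥"]
--
-- def calculate_dayun(month_gan, month_zhi, is_shunxing):
--     # Staged: take an 8-long run of stems and of branches by slicing doubled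
--     # tables, then zip the two runs into pillars.  A backward run is the
--     # reverse of the forward run that starts 7 steps earlier.
--     if is_shunxing:
--         g0, z0 = month_gan % 10, month_zhi % 12
--         gans = (HEAVENLY_STEMS * 2)[g0:g0 + 8]
--         zhis = (EARTHLY_BRANCHES * 2)[z0:z0 + 8]
--     else:
--         g0, z0 = (month_gan - 7) % 10, (month_zhi - 7) % 12
--         gans = (HEAVENLY_STEMS * 2)[g0:g0 + 8][::-1]
--         zhis = (EARTHLY_BRANCHES * 2)[z0:z0 + 8][::-1]
--     return [a + b for a, b in zip(gans, zhis)]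
-- ===== Notes on version B (the rewrite author's own statement) =====
-- stated objective: alternative
-- what changed: Instead of stepping indices one pillar at a time, B slices an 8-long run out of doubled stem/branch tables (reversing the run for the backward direction) and zips the two runs into pillars; no per-pillar index arithmetic remains.
import Mathlib
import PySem

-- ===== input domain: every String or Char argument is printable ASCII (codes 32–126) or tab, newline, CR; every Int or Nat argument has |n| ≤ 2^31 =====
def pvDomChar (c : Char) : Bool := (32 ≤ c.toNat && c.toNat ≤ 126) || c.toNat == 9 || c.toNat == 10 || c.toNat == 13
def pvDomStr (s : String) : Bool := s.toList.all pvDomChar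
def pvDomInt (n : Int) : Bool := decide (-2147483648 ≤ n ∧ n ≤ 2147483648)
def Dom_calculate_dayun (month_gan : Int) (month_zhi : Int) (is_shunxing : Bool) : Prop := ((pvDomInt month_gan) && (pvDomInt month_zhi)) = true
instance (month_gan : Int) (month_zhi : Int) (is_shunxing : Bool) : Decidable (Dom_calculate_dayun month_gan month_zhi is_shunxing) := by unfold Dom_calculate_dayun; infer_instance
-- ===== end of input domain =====

-- B replaces A's per-pillar index stepping with slicing 8-long runs out of
-- doubled stem/branch tables (reversed for the backward direction) and zipping
-- them (objective: alternative).

-- ===== PORT A =====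
def pvStems : List String := ["甲", "乙", "丙", "丁", "戊", "己", "庚", "辛", "壬", "癸"]
def pvBranches : List String := ["子", "丑", "寅", "卯", "辰", "巳", "午", "未", "申", "酉", "戌", "亥"]

-- literal transliteration of A's loop: thread (current_gan, current_zhi, acc) over 8 steps
def pvLoopA (is_shunxing : Bool) : Nat → Int → Int → List String → List String
  | 0, _, _, acc => acc
  | Nat.succ k, g, z, acc =>
    let p := ((PySem.List.pyGet? pvStems g).getD "") ++ ((PySem.List.pyGet? pvBranches z).getD "")
    if is_shunxing then
      pvLoopA is_shunxing k (PySem.Int.mod (g + 1) 10) (PySem.Int.mod (z + 1) 12) (acc ++ [p])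
    else
      pvLoopA is_shunxing k (PySem.Int.mod (g - 1) 10) (PySem.Int.mod (z - 1) 12) (acc ++ [p])

def calculate_dayun (month_gan : Int) (month_zhi : Int) (is_shunxing : Bool) : List String :=
  pvLoopA is_shunxing 8 month_gan month_zhi []

-- ===== PORT B =====
def calculate_dayun_alt (month_gan : Int) (month_zhi : Int) (is_shunxing : Bool) : List String :=
  if is_shunxing then
    let g0 := PySem.Int.mod month_gan 10
    let z0 := PySem.Int.mod month_zhi 12
    let gans := PySem.List.slice (pvStems ++ pvStems) (some g0) (some (g0 + 8))
    let zhis := PySem.List.slice (pvBranches ++ pvBranches) (some z0) (some (z0 + 8))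
    (gans.zip zhis).map fun p => p.1 ++ p.2
  else
    let g0 := PySem.Int.mod (month_gan - 7) 10
    let z0 := PySem.Int.mod (month_zhi - 7) 12
    let gans := (PySem.List.slice (pvStems ++ pvStems) (some g0) (some (g0 + 8))).reverse
    let zhis := (PySem.List.slice (pvBranches ++ pvBranches) (some z0) (some (z0 + 8))).reverse
    (gans.zip zhis).map fun p => p.1 ++ p.2

-- ===== PRECONDITION & SPEC =====
-- Pre_ excludes exactly the inputs on which A raises IndexError (the first,
-- un-reduced list indexing is outside Python's negative-index range).
def Pre_calculate_dayun (month_gan : Int) (month_zhi : Int) (is_shunxing : Bool) : Prop :=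
  -10 ≤ month_gan ∧ month_gan ≤ 9 ∧ -12 ≤ month_zhi ∧ month_zhi ≤ 11
instance (month_gan : Int) (month_zhi : Int) (is_shunxing : Bool) : Decidable (Pre_calculate_dayun month_gan month_zhi is_shunxing) := by unfold Pre_calculate_dayun; infer_instance
def pvWitness_calculate_dayun : Int × Int × Bool := (2, -3, false)

def Spec_calculate_dayun (month_gan : Int) (month_zhi : Int) (is_shunxing : Bool) (out : List String) : Prop := out = calculate_dayun_alt month_gan month_zhi is_shunxing
instance (month_gan : Int) (month_zhi : Int) (is_shunxing : Bool) (out : List String) : Decidable (Spec_calculate_dayun month_gan month_zhi is_shunxing out) := by unfold Spec_calculate_dayun; infer_instance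

-- ===== CLAIM (what is proved, stated in full; the proofs are below) =====
def Claim_equal_calculate_dayun : Prop := ∀ (month_gan : Int) (month_zhi : Int) (is_shunxing : Bool), Dom_calculate_dayun month_gan month_zhi is_shunxing → Pre_calculate_dayun month_gan month_zhi is_shunxing → Spec_calculate_dayun month_gan month_zhi is_shunxing (calculate_dayun month_gan month_zhi is_shunxing)

-- ===== LEMMAS AND PROOFS =====
lemma pv_key : ∀ g ∈ Finset.Icc (-10 : Int) 9, ∀ z ∈ Finset.Icc (-12 : Int) 11,
    ∀ b : Bool, calculate_dayun g z b = calculate_dayun_alt g z b := by decide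

-- ===== VERDICT (by name: the statements are the Claim_ definitions above) =====
theorem calculate_dayun_spec : Claim_equal_calculate_dayun := by
  intro g z b _ hpre
  obtain ⟨h1, h2, h3, h4⟩ := hpre
  exact pv_key g (Finset.mem_Icc.mpr ⟨h1, h2⟩) z (Finset.mem_Icc.mpr ⟨h3, h4⟩) b
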